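-- pv_equiv track=rewrite | github.com/Rightscar/crs2 | modules/testing_support.py | _generate_qa_content
-- ===== SOURCE A (Python) =====
-- def _generate_qa_content(length: int) -> str:
--     """Generate Q&A style test content"""
--     qa_pairs = [
--         ("Q: What is consciousness?", "A: Consciousness is the state of being aware of one's surroundings and thoughts."),
--         ("Q: How can we cultivate mindfulness?", "A: Through regular meditation practice and present-moment awareness."),
--         ("Q: What is the nature of reality?", "A: Reality is often understood as the fundamental nature of existence."),
--     ]
--
--     content = []
--     current_length = 0
--
--     while current_length < length:
--         for q, a in qa_pairs:
--             content.append(q)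
--             content.append(a)
--             content.append("")  # Empty line
--             current_length += len(q) + len(a) + 2
--
--             if current_length >= length:
--                 break
--
--     return "\n".join(content)
-- ===== SOURCE B (Python) =====
-- def _generate_qa_content(length: int) -> str:
--     """Generate Q&A style test content (closed-form count, single materialization)."""
--     qa_pairs = [
--         ("Q: What is consciousness?", "A: Consciousness is the state of being aware of one's surroundings and thoughts."),
--         ("Q: How can we cultivate mindfulness?", "A: Through regular meditation practice and present-moment awareness."),
--         ("Q: What is the nature of reality?", "A: Reality is often understood as the fundamental nature of existence."),
--     ]
--     items = [x for q, a in qa_pairs for x in (q, a, "")]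
--     weights = [len(q) + len(a) + 2 for q, a in qa_pairs]
--     total = sum(weights)
--     if length <= 0:
--         return ""
--     full = (length - 1) // total
--     rem = length - full * total
--     if rem <= weights[0]:
--         tail_pairs = 1
--     elif rem <= weights[0] + weights[1]:
--         tail_pairs = 2
--     else:
--         tail_pairs = 3
--     return "\n".join(items * full + items[:3 * tail_pairs])
-- ===== Notes on version B (the rewrite author's own statement) =====
-- stated objective: alternative
-- what changed: Replaces the while/for accumulation loop (break on threshold) with a closed-form floor-division count of full cycles plus a short partial tail chosen by comparing the remainder against the cumulative pair weights, materialized in one list expression.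
import Mathlib
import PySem

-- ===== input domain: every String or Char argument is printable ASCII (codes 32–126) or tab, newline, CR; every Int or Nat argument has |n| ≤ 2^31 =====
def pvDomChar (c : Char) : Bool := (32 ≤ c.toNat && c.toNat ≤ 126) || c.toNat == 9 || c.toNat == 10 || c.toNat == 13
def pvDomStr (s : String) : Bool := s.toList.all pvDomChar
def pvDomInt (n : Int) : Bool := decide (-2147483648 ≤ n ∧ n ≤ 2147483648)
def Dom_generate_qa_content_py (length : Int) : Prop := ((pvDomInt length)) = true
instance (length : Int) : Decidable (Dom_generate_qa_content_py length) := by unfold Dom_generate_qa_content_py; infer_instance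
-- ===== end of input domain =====

-- B changes the decomposition only (closed-form cycle count instead of a break-on-threshold loop); no speed claim.

-- ===== PORT A =====
-- the literal qa_pairs table (shared data between both ports)
def pvQaPairs : List (String × String) :=
  [("Q: What is consciousness?", "A: Consciousness is the state of being aware of one's surroundings and thoughts."),
   ("Q: How can we cultivate mindfulness?", "A: Through regular meditation practice and present-moment awareness."),
   ("Q: What is the nature of reality?", "A: Reality is often understood as the fundamental nature of existence.")]

-- the inner 'for q, a in qa_pairs' with its break (break returns to the while test, so no flag needed)
def pvForPairs (length : Int) : List (String × String) → List String → Int → (List String × Int)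
  | [], acc, cur => (acc, cur)
  | (q, a) :: rest, acc, cur =>
    let acc' := acc ++ [q, a, ""]
    let cur' := cur + (PySem.Str.len q + PySem.Str.len a + 2)
    if cur' ≥ length then (acc', cur') else pvForPairs length rest acc' cur'

theorem pvLen0q : PySem.Str.len "Q: What is consciousness?" = 25 := by decide
theorem pvLen0a : PySem.Str.len "A: Consciousness is the state of being aware of one's surroundings and thoughts." = 80 := by decide
theorem pvLen1q : PySem.Str.len "Q: How can we cultivate mindfulness?" = 36 := by decide
theorem pvLen1a : PySem.Str.len "A: Through regular meditation practice and present-moment awareness." = 68 := by decide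
theorem pvLen2q : PySem.Str.len "Q: What is the nature of reality?" = 33 := by decide
theorem pvLen2a : PySem.Str.len "A: Reality is often understood as the fundamental nature of existence." = 70 := by decide

-- each full pass over pvQaPairs raises the counter by at least 107 (needed for termination)
theorem pvForPairs_snd_ge (length : Int) (acc : List String) (cur : Int) :
    cur + 107 ≤ (pvForPairs length pvQaPairs acc cur).2 := by
  simp only [pvQaPairs, pvForPairs, pvLen0q, pvLen0a, pvLen1q, pvLen1a, pvLen2q, pvLen2a]
  norm_num
  split_ifs <;> simp <;> omega

-- the outer 'while current_length < length'
def pvWhile (length cur : Int) (acc : List String) : List String :=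
  if cur < length then
    let r := pvForPairs length pvQaPairs acc cur
    pvWhile length r.2 r.1
  else acc
termination_by (length - cur).toNat
decreasing_by
  have h := pvForPairs_snd_ge length acc cur
  omega

def generate_qa_content_py (length : Int) : String :=
  PySem.Str.join "\n" (pvWhile length 0 [])

-- ===== PORT B =====
def generate_qa_content_py_alt (length : Int) : String :=
  let items := pvQaPairs.flatMap (fun p => [p.1, p.2, ""])
  let weights := pvQaPairs.map (fun p => PySem.Str.len p.1 + PySem.Str.len p.2 + 2)
  let total := weights.sum
  if length ≤ 0 then ""
  else
    let full := PySem.Int.floordiv (length - 1) total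
    let rem := length - full * total
    let tail_pairs : Int :=
      if rem ≤ weights.getD 0 0 then 1
      else if rem ≤ weights.getD 0 0 + weights.getD 1 0 then 2
      else 3
    PySem.Str.join "\n" (List.flatten (List.replicate full.toNat items) ++
      PySem.List.slice items none (some (3 * tail_pairs)))

-- ===== PRECONDITION & SPEC =====
def Spec_generate_qa_content_py (length : Int) (out : String) : Prop := out = generate_qa_content_py_alt length
instance (length : Int) (out : String) : Decidable (Spec_generate_qa_content_py length out) := by unfold Spec_generate_qa_content_py; infer_instance

-- ===== CLAIM (what is proved, stated in full; the proofs are below) =====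
def Claim_equal_generate_qa_content_py : Prop := ∀ (length : Int), Dom_generate_qa_content_py length → Spec_generate_qa_content_py length (generate_qa_content_py length)

-- ===== LEMMAS AND PROOFS =====

def pvItems : List String := pvQaPairs.flatMap (fun p => [p.1, p.2, ""])

def pvTail1 : List String := pvItems.take 3
def pvTail2 : List String := pvItems.take 6

-- B's emitted list, in closed form
def pvBL (len : Int) : List String :=
  let f := PySem.Int.floordiv (len - 1) 318
  let rem := len - f * 318
  List.flatten (List.replicate f.toNat pvItems) ++
    (if rem ≤ 107 then pvTail1 else if rem ≤ 213 then pvTail2 else pvItems)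

theorem pvForPairs_eval (len cur : Int) (acc : List String) :
    pvForPairs len pvQaPairs acc cur =
      if cur + 107 ≥ len then (acc ++ pvTail1, cur + 107)
      else if cur + 213 ≥ len then (acc ++ pvTail2, cur + 213)
      else (acc ++ pvItems, cur + 318) := by
  simp only [pvQaPairs, pvForPairs, pvTail1, pvTail2, pvItems,
    pvLen0q, pvLen0a, pvLen1q, pvLen1a, pvLen2q, pvLen2a]
  norm_num
  split_ifs <;> simp_all <;> omega

theorem pvWhile_acc : ∀ (n : Nat) (len cur : Int) (acc : List String),
    (len - cur).toNat = n → pvWhile len cur acc = acc ++ pvWhile len cur [] := by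
  intro n
  induction n using Nat.strong_induction_on with
  | _ n ih =>
    intro len cur acc hn
    conv_lhs => rw [pvWhile]
    conv_rhs => rw [pvWhile]
    by_cases h : cur < len
    · simp only [h, if_pos, pvForPairs_eval]
      split_ifs with h1 h2 <;> dsimp only <;> simp only [List.nil_append]
      · rw [ih (len - (cur + 107)).toNat (by omega) len (cur + 107) (acc ++ pvTail1) rfl,
            ih (len - (cur + 107)).toNat (by omega) len (cur + 107) pvTail1 rfl]
        simp
      · rw [ih (len - (cur + 213)).toNat (by omega) len (cur + 213) (acc ++ pvTail2) rfl,
            ih (len - (cur + 213)).toNat (by omega) len (cur + 213) pvTail2 rfl]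
        simp
      · rw [ih (len - (cur + 318)).toNat (by omega) len (cur + 318) (acc ++ pvItems) rfl,
            ih (len - (cur + 318)).toNat (by omega) len (cur + 318) pvItems rfl]
        simp
    · simp [h]

theorem pvWhile_shift : ∀ (n : Nat) (len cur : Int) (acc : List String),
    (len - cur).toNat = n → pvWhile len cur acc = pvWhile (len - cur) 0 acc := by
  intro n
  induction n using Nat.strong_induction_on with
  | _ n ih =>
    intro len cur acc hn
    conv_lhs => rw [pvWhile]
    conv_rhs => rw [pvWhile]
    by_cases h : cur < len
    · have h' : (0 : Int) < len - cur := by omega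
      simp only [h, h', if_pos, pvForPairs_eval]
      split_ifs with h1 h2 h3 h4 h5 <;> dsimp only <;> (try simp only [List.nil_append]) <;> try omega
      · rw [ih (len - (cur + 107)).toNat (by omega) len (cur + 107) (acc ++ pvTail1) rfl,
            ih ((len - cur) - (0 + 107)).toNat (by omega) (len - cur) (0 + 107) (acc ++ pvTail1) rfl]
        have he : len - (cur + 107) = len - cur - (0 + 107) := by ring
        rw [he]
      · rw [ih (len - (cur + 213)).toNat (by omega) len (cur + 213) (acc ++ pvTail2) rfl,
            ih ((len - cur) - (0 + 213)).toNat (by omega) (len - cur) (0 + 213) (acc ++ pvTail2) rfl]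
        have he : len - (cur + 213) = len - cur - (0 + 213) := by ring
        rw [he]
      · rw [ih (len - (cur + 318)).toNat (by omega) len (cur + 318) (acc ++ pvItems) rfl,
            ih ((len - cur) - (0 + 318)).toNat (by omega) (len - cur) (0 + 318) (acc ++ pvItems) rfl]
        have he : len - (cur + 318) = len - cur - (0 + 318) := by ring
        rw [he]
    · have h' : ¬ (0 : Int) < len - cur := by omega
      simp [h, h']

theorem pvFloordiv_zero (a : Int) (h0 : 0 ≤ a) (h1 : a < 318) :
    PySem.Int.floordiv a 318 = 0 := by
  rw [PySem.Int.floordiv_eq_iff_of_pos (by omega)]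
  omega

theorem pvFloordiv_step (len : Int) (h : 318 < len) :
    PySem.Int.floordiv (len - 1) 318 = PySem.Int.floordiv (len - 318 - 1) 318 + 1 := by
  have hb := PySem.Int.floordiv_eq_iff_of_pos (a := len - 318 - 1) (b := 318)
    (q := PySem.Int.floordiv (len - 318 - 1) 318) (by omega)
  have hq := hb.mp rfl
  rw [PySem.Int.floordiv_eq_iff_of_pos (by omega)]
  constructor <;> nlinarith [hq.1, hq.2]

theorem pvFloordiv_nonneg (len : Int) (h : 0 < len) :
    0 ≤ PySem.Int.floordiv (len - 1) 318 := by
  have hb := PySem.Int.floordiv_eq_iff_of_pos (a := len - 1) (b := 318)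
    (q := PySem.Int.floordiv (len - 1) 318) (by omega)
  have hq := hb.mp rfl
  nlinarith [hq.1, hq.2]

theorem pvWhile_eq_pvBL : ∀ (n : Nat) (len : Int), len.toNat = n →
    pvWhile len 0 [] = (if len ≤ 0 then [] else pvBL len) := by
  intro n
  induction n using Nat.strong_induction_on with
  | _ n ih =>
    intro len hn
    by_cases hpos : len ≤ 0
    · rw [pvWhile]
      rw [if_neg (show ¬ ((0:Int) < len) by omega), if_pos hpos]
    · rw [pvWhile, if_pos (show (0:Int) < len by omega), if_neg hpos]
      simp only [pvForPairs_eval]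
      by_cases hle : len ≤ 318
      · have hf : PySem.Int.floordiv (len - 1) 318 = 0 := pvFloordiv_zero _ (by omega) (by omega)
        split_ifs with h1 h2 <;> dsimp only <;>
          rw [pvWhile] <;> simp only [pvBL, hf, List.nil_append] <;>
          simp only [show len - (0:Int) * 318 = len from by ring, Int.toNat_zero,
            List.replicate_zero, List.flatten_nil, List.nil_append]
        · rw [if_neg (show ¬ ((0:Int) + 107 < len) by omega),
              if_pos (show len ≤ 107 by omega)]
        · rw [if_neg (show ¬ ((0:Int) + 213 < len) by omega),
              if_neg (show ¬ (len ≤ 107) by omega), if_pos (show len ≤ 213 by omega)]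
        · rw [if_neg (show ¬ ((0:Int) + 318 < len) by omega),
              if_neg (show ¬ (len ≤ 107) by omega), if_neg (show ¬ (len ≤ 213) by omega)]
      · rw [if_neg (show ¬ ((0:Int) + 107 ≥ len) by omega),
            if_neg (show ¬ ((0:Int) + 213 ≥ len) by omega)]
        dsimp only
        rw [pvWhile_acc (len - (0 + 318)).toNat len (0 + 318) ([] ++ pvItems) rfl,
            pvWhile_shift (len - (0 + 318)).toNat len (0 + 318) [] rfl]
        rw [show len - (0 + 318) = len - 318 by ring]
        rw [ih (len - 318).toNat (by omega) (len - 318) rfl]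
        rw [if_neg (show ¬ (len - 318 ≤ 0) by omega)]
        simp only [pvBL, List.nil_append]
        have hstep := pvFloordiv_step len (by omega)
        have hq0 : 0 ≤ PySem.Int.floordiv (len - 318 - 1) 318 := pvFloordiv_nonneg (len - 318) (by omega)
        rw [hstep]
        rw [show (PySem.Int.floordiv (len - 318 - 1) 318 + 1).toNat
            = (PySem.Int.floordiv (len - 318 - 1) 318).toNat + 1 by omega]
        rw [List.replicate_succ, List.flatten_cons, List.append_assoc]
        rw [show len - (PySem.Int.floordiv (len - 318 - 1) 318 + 1) * 318
            = len - 318 - PySem.Int.floordiv (len - 318 - 1) 318 * 318 by ring]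

theorem pvAlt_eval (len : Int) :
    generate_qa_content_py_alt len = if len ≤ 0 then "" else PySem.Str.join "\n" (pvBL len) := by
  by_cases h : len ≤ 0
  · simp [generate_qa_content_py_alt, h]
  · simp only [generate_qa_content_py_alt, pvBL, pvItems, pvTail1, pvTail2, pvQaPairs, if_neg h,
      List.map_cons, List.map_nil, List.flatMap_cons, List.flatMap_nil, List.sum_cons, List.sum_nil,
      pvLen0q, pvLen0a, pvLen1q, pvLen1a, pvLen2q, pvLen2a, List.getD, List.getElem?_cons_zero,
      List.getElem?_cons_succ, Option.getD_some]
    norm_num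
    split_ifs <;> congr 1 <;> decide

-- ===== VERDICT (by name: the statement is the Claim_ definition above) =====
theorem generate_qa_content_py_spec : Claim_equal_generate_qa_content_py := by
  intro len _
  unfold Spec_generate_qa_content_py generate_qa_content_py
  rw [pvAlt_eval, pvWhile_eq_pvBL len.toNat len rfl]
  by_cases h : len ≤ 0
  · rw [if_pos h, if_pos h]
    decide
  · rw [if_neg h, if_neg h]
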